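-- pv_equiv track=rewrite | github.com/danigfavero/geometria-computacional | vjudge/saint_john_festival.py | saint_john
-- ===== SOURCE A (Python) =====
-- import functools
--
-- def tuple_subtraction(t1, t2):
--     return t1[0] - t2[0], t1[1] - t2[1]
--
-- def cross(a, b):
--     return a[0] * b[1] - a[1] * b[0]
--
-- def signed_area_parallelogram(a, b, c):
--     return cross(tuple_subtraction(b, a), tuple_subtraction(c, b))
--
-- def is_inside_polygon(polygon, begin, end, point):
--     n = end - begin + 1
--     eps = 1e-9
--     if n < 3:
--         return False
--     if signed_area_parallelogram(polygon[0], point, polygon[1]) > eps: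
--         return False
--     if signed_area_parallelogram(polygon[0], point, polygon[n - 1]) < -eps:
--         return False
--
--     l = 2
--     r = n - 1
--     line = -1
--     while l <= r:
--         mid = (l+r)//2
--         if signed_area_parallelogram(polygon[0], point, polygon[mid]) > -eps:
--             line = mid
--             r = mid - 1
--         else:
--             l = mid + 1
--     return signed_area_parallelogram(polygon[line - 1], point, polygon[line]) < eps
--
-- def convex_hull(points):
--     def cmp(a, b):
--         return (a > b) - (a < b)
--
--     def turn(p, q, r):
--         return cmp((q[0] - p[0])*(r[1] - p[1]) - (r[0] - p[0])*(q[1] - p[1]), 0)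
--
--     def left(hull, r):
--         perimetro = 0
--         while len(hull) > 1 and turn(hull[-2], hull[-1], r) != 1:
--             hull.pop()
--         if not len(hull) or hull[-1] != r:
--             hull.append(r)
--         return hull
--
--     points = sorted(points)
--     l = functools.reduce(left, points, [])
--     u = functools.reduce(left, reversed(points), [])
--     return l.extend(u[i] for i in range(1, len(u) - 1)) or l
--
-- def saint_john(large, L, small, S):
--     hull = convex_hull(large)
--     n = 0
--     size = len(hull)
--     for s in small:
--         if is_inside_polygon(hull, 0, size - 1, s):
--             n += 1
--     return n
-- ===== SOURCE B (Python) =====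
-- def _area(o, a, b):
--     # signed area of parallelogram (o,a,b): cross(a-o, b-a)
--     return (a[0] - o[0]) * (b[1] - a[1]) - (b[0] - a[0]) * (a[1] - o[1])
--
-- def _half_hull(pts):
--     chain = []
--     for p in pts:
--         while len(chain) > 1 and _area(chain[-2], chain[-1], p) <= 0:
--             chain.pop()
--         if not chain or chain[-1] != p:
--             chain.append(p)
--     return chain
--
-- def _convex_hull(points):
--     pts = sorted(points)
--     lower = _half_hull(pts)
--     upper = _half_hull(pts[::-1])
--     return lower + upper[1:-1]
--
-- def _inside(hull, p):
--     n = len(hull)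
--     if n < 3:
--         return False
--     if _area(hull[0], p, hull[1]) > 0:
--         return False
--     if _area(hull[0], p, hull[n - 1]) < 0:
--         return False
--     line = n - 1
--     for i in range(2, n - 1):
--         if _area(hull[0], p, hull[i]) >= 0:
--             line = i
--             break
--     return _area(hull[line - 1], p, hull[line]) <= 0
--
-- def saint_john(large, L, small, S):
--     hull = _convex_hull(large)
--     return sum(1 for s in small if _inside(hull, s))
-- ===== Notes on version B (the rewrite author's own statement) =====
-- stated objective: simpler
-- what changed: B drops the per-point fan binary search with float eps thresholds and instead linearly scans for the first fan sector in exact integer arithmetic (the integer signed areas make eps = 1e-9 equivalent to exact sign tests), and builds the hull with plain loops instead of functools.reduce over a mutating closure.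
import Mathlib
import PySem

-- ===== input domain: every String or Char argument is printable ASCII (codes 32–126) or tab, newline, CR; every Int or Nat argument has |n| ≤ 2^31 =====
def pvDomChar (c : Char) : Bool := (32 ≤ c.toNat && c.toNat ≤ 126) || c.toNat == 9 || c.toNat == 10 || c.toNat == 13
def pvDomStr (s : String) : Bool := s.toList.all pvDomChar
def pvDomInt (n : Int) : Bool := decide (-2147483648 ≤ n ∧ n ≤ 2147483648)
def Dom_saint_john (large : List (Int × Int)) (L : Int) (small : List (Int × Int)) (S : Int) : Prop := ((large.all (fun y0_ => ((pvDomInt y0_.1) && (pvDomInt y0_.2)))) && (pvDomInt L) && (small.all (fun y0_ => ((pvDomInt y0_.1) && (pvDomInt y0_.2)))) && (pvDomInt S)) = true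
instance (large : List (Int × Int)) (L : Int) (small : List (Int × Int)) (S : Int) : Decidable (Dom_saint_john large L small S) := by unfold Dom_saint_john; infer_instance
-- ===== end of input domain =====

-- B replaces A's per-point fan binary search (float eps thresholds) by a linear first-sector
-- scan in exact integer arithmetic, and builds the hull with plain loops instead of
-- functools.reduce over a mutating closure: simpler, same return value.

-- ===== PORT A =====
-- small named termination facts (cited by the ports' decreasing_by; keeps the recursion bodies small)
theorem pvDecPop (hull : List (Int × Int)) (h : 1 < hull.length) :
    hull.dropLast.length < hull.length := by
  rw [List.length_dropLast]; omega
theorem pvDecBs1 (l r : Int) (h : l ≤ r) :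
    (PySem.Int.floordiv (l + r) 2 - 1 + 1 - l).toNat < (r + 1 - l).toNat := by
  have := PySem.Int.floordiv_two_mid_bounds h; omega
theorem pvDecBs2 (l r : Int) (h : l ≤ r) :
    (r + 1 - (PySem.Int.floordiv (l + r) 2 + 1)).toNat < (r + 1 - l).toNat := by
  have := PySem.Int.floordiv_two_mid_bounds h; omega
theorem pvDecScan (n i : Int) (h : i < n - 1) :
    (n - 1 - (i + 1)).toNat < (n - 1 - i).toNat := by omega

def pvSubA (t1 t2 : Int × Int) : Int × Int := (t1.1 - t2.1, t1.2 - t2.2)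
def pvCrossA (a b : Int × Int) : Int := a.1 * b.2 - a.2 * b.1
def pvSapA (a b c : Int × Int) : Int := pvCrossA (pvSubA b a) (pvSubA c b)
-- polygon[i]; every access `saint_john` makes is in range (Python would raise on the default branch)
def pvGetA (xs : List (Int × Int)) (i : Int) : Int × Int := (PySem.List.pyGet? xs i).getD (0, 0)
def pvCmpA (a b : Int) : Int := (if a > b then (1 : Int) else 0) - (if a < b then (1 : Int) else 0)
def pvTurnA (p q r : Int × Int) : Int :=
  pvCmpA ((q.1 - p.1) * (r.2 - p.2) - (r.1 - p.1) * (q.2 - p.2)) 0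
-- the `while ... hull.pop()` loop of `left`
def pvPopA (hull : List (Int × Int)) (r : Int × Int) : List (Int × Int) :=
  if h : 1 < hull.length ∧ pvTurnA (pvGetA hull (-2)) (pvGetA hull (-1)) r ≠ 1 then
    pvPopA hull.dropLast r
  else hull
termination_by hull.length
decreasing_by exact pvDecPop hull h.1
def pvLeftA (hull0 : List (Int × Int)) (r : Int × Int) : List (Int × Int) :=
  let hull := pvPopA hull0 r
  if hull.length = 0 ∨ pvGetA hull (-1) ≠ r then hull ++ [r] else hull
def pvConvexHullA (points : List (Int × Int)) : List (Int × Int) :=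
  let pts := PySem.List.sorted2 points Prod.fst Prod.snd
  let l := pts.foldl pvLeftA []
  let u := pts.reverse.foldl pvLeftA []
  l ++ (List.take (u.length - 2) (List.drop 1 u))  -- l.extend(u[i] for i in range(1, len(u)-1)) or l
-- eps = 1e-9 against INTEGER areas: `> eps` is `> 0`, `< -eps` is `< 0`, `> -eps` is `≥ 0`, `< eps` is `≤ 0` (exact)
def pvBsearchA (polygon : List (Int × Int)) (point : Int × Int) (l r line : Int) : Int :=
  if hlr : l ≤ r then
    let mid := PySem.Int.floordiv (l + r) 2
    if pvSapA (pvGetA polygon 0) point (pvGetA polygon mid) ≥ 0 then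
      pvBsearchA polygon point l (mid - 1) mid
    else
      pvBsearchA polygon point (mid + 1) r line
  else line
termination_by (r + 1 - l).toNat
decreasing_by
  · exact pvDecBs1 l r hlr
  · exact pvDecBs2 l r hlr
def pvIsInsideA (polygon : List (Int × Int)) (bg en : Int) (point : Int × Int) : Bool :=
  let n := en - bg + 1
  if n < 3 then false
  else if pvSapA (pvGetA polygon 0) point (pvGetA polygon 1) > 0 then false
  else if pvSapA (pvGetA polygon 0) point (pvGetA polygon (n - 1)) < 0 then false
  else
    let line := pvBsearchA polygon point 2 (n - 1) (-1)
    decide (pvSapA (pvGetA polygon (line - 1)) point (pvGetA polygon line) ≤ 0)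
def saint_john (large : List (Int × Int)) (L : Int) (small : List (Int × Int)) (S : Int) : Int :=
  let hull := pvConvexHullA large
  let size := PySem.List.len hull
  small.foldl (fun n s => if pvIsInsideA hull 0 (size - 1) s then n + 1 else n) 0

-- ===== PORT B =====
def pvAreaB (o a b : Int × Int) : Int := (a.1 - o.1) * (b.2 - a.2) - (b.1 - a.1) * (a.2 - o.2)
def pvGetB (xs : List (Int × Int)) (i : Int) : Int × Int := (PySem.List.pyGet? xs i).getD (0, 0)
-- the `while ... chain.pop()` loop of `_half_hull` (chain kept top-first)
def pvPopB : List (Int × Int) → (Int × Int) → List (Int × Int)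
  | b :: a :: t, p => if pvAreaB a b p ≤ 0 then pvPopB (a :: t) p else b :: a :: t
  | st, _ => st
def pvStepB (st : List (Int × Int)) (p : Int × Int) : List (Int × Int) :=
  match pvPopB st p with
  | [] => [p]
  | q :: t => if q = p then q :: t else p :: q :: t
def pvHalfHullB (pts : List (Int × Int)) : List (Int × Int) := (pts.foldl pvStepB []).reverse
def pvHullB (points : List (Int × Int)) : List (Int × Int) :=
  let pts := PySem.List.sorted2 points Prod.fst Prod.snd
  let lower := pvHalfHullB pts
  let upper := pvHalfHullB pts.reverse  -- pts[::-1]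
  lower ++ (upper.drop 1).dropLast      -- upper[1:-1]
-- `for i in range(2, n-1): if area(...) >= 0: line = i; break` (default line = n-1)
def pvScanB (hull : List (Int × Int)) (p : Int × Int) (n i : Int) : Int :=
  if h : i < n - 1 then
    if pvAreaB (pvGetB hull 0) p (pvGetB hull i) ≥ 0 then i else pvScanB hull p n (i + 1)
  else n - 1
termination_by (n - 1 - i).toNat
decreasing_by exact pvDecScan n i h
def pvInsideB (hull : List (Int × Int)) (p : Int × Int) : Bool :=
  let n : Int := PySem.List.len hull
  if n < 3 then false
  else if pvAreaB (pvGetB hull 0) p (pvGetB hull 1) > 0 then false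
  else if pvAreaB (pvGetB hull 0) p (pvGetB hull (n - 1)) < 0 then false
  else
    let line := pvScanB hull p n 2
    decide (pvAreaB (pvGetB hull (line - 1)) p (pvGetB hull line) ≤ 0)
def saint_john_alt (large : List (Int × Int)) (L : Int) (small : List (Int × Int)) (S : Int) : Int :=
  let hull := pvHullB large
  ((small.countP (fun s => pvInsideB hull s) : Nat) : Int)

-- ===== PRECONDITION & SPEC =====
def Spec_saint_john (large : List (Int × Int)) (L : Int) (small : List (Int × Int)) (S : Int) (out : Int) : Prop := out = saint_john_alt large L small S
instance (large : List (Int × Int)) (L : Int) (small : List (Int × Int)) (S : Int) (out : Int) : Decidable (Spec_saint_john large L small S out) := by unfold Spec_saint_john; infer_instance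

-- ===== CLAIM (what is proved, stated in full; the proofs are below) =====
def Claim_equal_saint_john : Prop := ∀ (large : List (Int × Int)) (L : Int) (small : List (Int × Int)) (S : Int), Dom_saint_john large L small S → Spec_saint_john large L small S (saint_john large L small S)

-- ===== LEMMAS AND PROOFS =====

-- `pvD v` : v is lexicographically positive (a strictly increasing step)
def pvD (v : Int × Int) : Prop := 0 < v.1 ∨ (v.1 = 0 ∧ 0 < v.2)
def pvLexLt (p q : Int × Int) : Prop := pvD (pvSubA q p)
def pvSLE (p q : Int × Int) : Prop := pvLexLt p q ∨ p = q
-- stack-order turn positivity: every adjacent triple (newest first) is a strict left turn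
def pvT3 (l : List (Int × Int)) : Prop :=
  ∀ i : Nat, (h : i + 2 < l.length) →
    0 < pvCrossA (pvSubA (l[i+1]'(by omega)) (l[i+2]'h)) (pvSubA (l[i]'(by omega)) (l[i+1]'(by omega)))
-- the star property around the first hull vertex: the later vertices wind strictly CCW
def pvStar (h : List (Int × Int)) : Prop :=
  ∀ i j : Nat, 1 ≤ i → (hij : i < j) → (hj : j < h.length) →
    0 < pvCrossA (pvSubA (h[i]'(by omega)) (h[0]'(by omega))) (pvSubA (h[j]'hj) (h[0]'(by omega)))

-- ---- plane algebra ----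
lemma pv_sap_area (o a b : Int × Int) : pvSapA o a b = pvAreaB o a b := by
  simp only [pvSapA, pvAreaB, pvCrossA, pvSubA]; ring

lemma pv_sap_cross (o a b : Int × Int) :
    pvSapA o a b = pvCrossA (pvSubA a o) (pvSubA b o) := by
  simp only [pvSapA, pvCrossA, pvSubA]; ring

lemma pv_cross_antisymm (u v : Int × Int) : pvCrossA u v = -pvCrossA v u := by
  simp only [pvCrossA]; ring

lemma pv_trans {u v w : Int × Int} (hu : pvD u) (hv : pvD v) (hw : pvD w)
    (huv : 0 < pvCrossA u v) (hvw : 0 < pvCrossA v w) : 0 < pvCrossA u w := by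
  obtain ⟨u1, u2⟩ := u; obtain ⟨v1, v2⟩ := v; obtain ⟨w1, w2⟩ := w
  simp only [pvD, pvCrossA] at *
  have hv1 : 0 < v1 := by
    rcases hv with h | ⟨h0, h2⟩
    · exact h
    · exfalso
      subst h0
      have hw1 : w1 < 0 := by nlinarith
      rcases hw with h | ⟨h0, _⟩ <;> omega
  have hu1 : 0 < u1 := by
    rcases hu with h | ⟨h0, h2⟩
    · exact h
    · exfalso; subst h0; nlinarith
  have hw1 : 0 ≤ w1 := by rcases hw with h | ⟨h0, _⟩ <;> omega
  have hid : (u1 * w2 - u2 * w1) * v1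
      = (v1 * w2 - v2 * w1) * u1 + (u1 * v2 - u2 * v1) * w1 := by ring
  nlinarith [mul_pos hvw hu1, mul_nonneg (le_of_lt huv) hw1]

-- monotone step of the fan predicate: if the point is right of the first fan ray and
-- (weakly) left of ray a, it is (weakly) left of the next ray b
lemma pv_mono {v c a b : Int × Int} (h1 : pvCrossA v c ≤ 0)
    (hca : 0 < pvCrossA c a) (hcb : 0 < pvCrossA c b) (hab : 0 < pvCrossA a b)
    (hva : 0 ≤ pvCrossA v a) : 0 ≤ pvCrossA v b := by
  obtain ⟨v1, v2⟩ := v; obtain ⟨c1, c2⟩ := c; obtain ⟨a1, a2⟩ := a; obtain ⟨b1, b2⟩ := b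
  simp only [pvCrossA] at *
  have hid : (c1 * a2 - c2 * a1) * (v1 * b2 - v2 * b1)
      = (b1 * a2 - b2 * a1) * (v1 * c2 - v2 * c1) + (c1 * b2 - c2 * b1) * (v1 * a2 - v2 * a1) := by
    ring
  have t1 : 0 ≤ (b1 * a2 - b2 * a1) * (v1 * c2 - v2 * c1) := by
    nlinarith [mul_nonneg (by nlinarith : (0:Int) ≤ -(b1 * a2 - b2 * a1))
      (by nlinarith : (0:Int) ≤ -(v1 * c2 - v2 * c1))]
  nlinarith [t1, mul_nonneg (le_of_lt hcb) hva]

lemma pv_lexlt_trans {a b c : Int × Int} (h1 : pvLexLt a b) (h2 : pvLexLt b c) : pvLexLt a c := by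
  obtain ⟨a1, a2⟩ := a; obtain ⟨b1, b2⟩ := b; obtain ⟨c1, c2⟩ := c
  simp only [pvLexLt, pvD, pvSubA] at *; omega

lemma pv_sle_trans {a b c : Int × Int} (h1 : pvSLE a b) (h2 : pvSLE b c) : pvSLE a c := by
  rcases h1 with h1 | rfl
  · rcases h2 with h2 | rfl
    · exact Or.inl (pv_lexlt_trans h1 h2)
    · exact Or.inl h1
  · exact h2

lemma pv_chain_pairwise {α : Type} {R : α → α → Prop}
    (htr : ∀ a b c, R a b → R b c → R a c) :
    ∀ {l : List α}, List.IsChain R l → l.Pairwise R := by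
  intro l
  induction l with
  | nil => intro _; exact List.Pairwise.nil
  | cons x t ih =>
    intro h
    rcases t with _ | ⟨y, t'⟩
    · simp
    · have hxy : R x y := h.rel_head
      have hpt := ih h.tail
      refine List.Pairwise.cons ?_ hpt
      intro z hz
      rcases List.mem_cons.mp hz with rfl | hz
      · exact hxy
      · exact htr _ _ _ hxy (List.rel_of_pairwise_cons hpt hz)

-- ---- sorted2 produces a lexicographically nondecreasing list ----
lemma pv_insertBy_pw (before : (Int × Int) → (Int × Int) → Bool)
    (hT : ∀ a b, before a b = true → pvSLE a b)
    (hF : ∀ a b, before a b = false → pvSLE b a) :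
    ∀ (acc : List (Int × Int)) (x : Int × Int), acc.Pairwise pvSLE →
      (PySem.List.insertBy before x acc).Pairwise pvSLE := by
  intro acc
  induction acc with
  | nil => intro x _; simp [PySem.List.insertBy]
  | cons y ys ih =>
    intro x h
    rw [List.pairwise_cons] at h
    obtain ⟨hy, hys⟩ := h
    by_cases hb : before x y = true
    · rw [show PySem.List.insertBy before x (y :: ys) = x :: y :: ys by
        simp [PySem.List.insertBy, hb]]
      refine List.Pairwise.cons ?_ (List.Pairwise.cons hy hys)
      intro z hz
      rcases List.mem_cons.mp hz with rfl | hz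
      · exact hT _ _ hb
      · exact pv_sle_trans (hT _ _ hb) (hy z hz)
    · rw [show PySem.List.insertBy before x (y :: ys) = y :: PySem.List.insertBy before x ys by
        simp [PySem.List.insertBy, hb]]
      refine List.Pairwise.cons ?_ (ih x hys)
      intro z hz
      rcases (PySem.List.mem_insertBy before x z ys).mp hz with rfl | hz
      · exact hF _ _ (by simpa using hb)
      · exact hy z hz

lemma pv_sorted2_pairwise (xs : List (Int × Int)) :
    (PySem.List.sorted2 xs Prod.fst Prod.snd).Pairwise pvSLE := by
  rw [show PySem.List.sorted2 xs Prod.fst Prod.snd =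
      xs.foldl (fun acc x => PySem.List.insertBy
        (fun a b => decide (a.1 < b.1) || (!decide (b.1 < a.1) && decide (a.2 < b.2))) x acc) [] by
    simp [PySem.List.sorted2]]
  have hT : ∀ a b : Int × Int,
      (decide (a.1 < b.1) || (!decide (b.1 < a.1) && decide (a.2 < b.2))) = true → pvSLE a b := by
    intro a b h
    simp only [Bool.or_eq_true, Bool.and_eq_true, Bool.not_eq_eq_eq_not, Bool.not_true,
      decide_eq_true_eq, decide_eq_false_iff_not] at h
    left
    simp only [pvLexLt, pvD, pvSubA]
    omega
  have hF : ∀ a b : Int × Int,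
      (decide (a.1 < b.1) || (!decide (b.1 < a.1) && decide (a.2 < b.2))) = false → pvSLE b a := by
    intro a b h
    simp only [Bool.or_eq_false_iff, Bool.and_eq_false_iff, Bool.not_eq_eq_eq_not, Bool.not_false,
      decide_eq_true_eq, decide_eq_false_iff_not] at h
    obtain ⟨a1, a2⟩ := a; obtain ⟨b1, b2⟩ := b
    simp only [pvSLE, pvLexLt, pvD, pvSubA, Prod.mk.injEq] at *
    omega
  have hfold : ∀ (l acc : List (Int × Int)), acc.Pairwise pvSLE →
      (l.foldl (fun acc x => PySem.List.insertBy
        (fun a b => decide (a.1 < b.1) || (!decide (b.1 < a.1) && decide (a.2 < b.2))) x acc)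
        acc).Pairwise pvSLE := by
    intro l
    induction l with
    | nil => intro acc h; exact h
    | cons x t ih =>
      intro acc h
      exact ih _ (pv_insertBy_pw _ hT hF acc x h)
  exact hfold xs [] List.Pairwise.nil

-- ---- the shared pop/push step keeps the stack a strictly convex chain ----
lemma pv_popB_suffix (p : Int × Int) : ∀ st, pvPopB st p <:+ st := by
  intro st
  induction st with
  | nil => simp [pvPopB]
  | cons b t ih =>
    match t with
    | [] => simp [pvPopB]
    | a :: t' =>
      rw [pvPopB]
      split
      · exact ih.trans (List.suffix_cons b _)
      · exact List.suffix_refl _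

lemma pv_popB_ne_nil (p : Int × Int) : ∀ st, st ≠ [] → pvPopB st p ≠ [] := by
  intro st
  induction st with
  | nil => simp
  | cons b t ih =>
    match t with
    | [] => simp [pvPopB]
    | a :: t' =>
      intro _
      rw [pvPopB]
      split
      · exact ih (by simp)
      · simp

lemma pv_popB_stop (p : Int × Int) : ∀ st q a t, pvPopB st p = q :: a :: t →
    0 < pvAreaB a q p := by
  intro st
  induction st with
  | nil => intro q a t h; simp [pvPopB] at h
  | cons b s ih =>
    match s with
    | [] => intro q a t h; simp [pvPopB] at h
    | a' :: t' =>
      intro q a t h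
      rw [pvPopB] at h
      split at h
      · exact ih q a t h
      · rename_i hc
        obtain ⟨rfl, rfl, rfl⟩ : b = q ∧ a' = a ∧ t' = t := by
          simpa using h
        omega

lemma pv_popB_getLast? (p : Int × Int) (st : List (Int × Int)) (h : st ≠ []) :
    (pvPopB st p).getLast? = st.getLast? := by
  obtain ⟨pre, hpre⟩ := pv_popB_suffix p st
  conv_rhs => rw [← hpre]
  rw [List.getLast?_append_of_ne_nil]
  exact pv_popB_ne_nil p st h

lemma pv_t3_suffix {l l₁ : List (Int × Int)} (hs : l₁ <:+ l) (h : pvT3 l) : pvT3 l₁ := by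
  obtain ⟨pre, rfl⟩ := hs
  intro i hi
  have h1 : pre.length + i + 2 < (pre ++ l₁).length := by
    simp only [List.length_append] at *; omega
  have := h (pre.length + i) h1
  simp only [List.getElem_append_right (by omega : pre.length ≤ pre.length + i),
    List.getElem_append_right (by omega : pre.length ≤ pre.length + i + 1),
    List.getElem_append_right (by omega : pre.length ≤ pre.length + i + 2)] at this
  simpa [Nat.add_sub_cancel_left, Nat.sub_eq, show pre.length + i + 1 - pre.length = i + 1 by omega,
    show pre.length + i + 2 - pre.length = i + 2 by omega] using this

lemma pv_t3_cons {p q : Int × Int} {t : List (Int × Int)} (h : pvT3 (q :: t))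
    (hd : ∀ a t', t = a :: t' → 0 < pvCrossA (pvSubA q a) (pvSubA p q)) :
    pvT3 (p :: q :: t) := by
  intro i hi
  match i with
  | 0 =>
    match t, hi with
    | a :: t', _ => simpa using hd a t' rfl
  | Nat.succ i' =>
    have := h i' (by simpa using hi)
    simpa using this

lemma pv_stepB_head? (st : List (Int × Int)) (p : Int × Int) :
    (pvStepB st p).head? = some p := by
  unfold pvStepB
  split
  · rfl
  · rename_i q t hq
    split
    · rename_i hqp; simp [hqp]
    · simp

lemma pv_stepB_getLast? (st : List (Int × Int)) (p : Int × Int) :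
    (pvStepB st p).getLast? = st.getLast?.or (some p) := by
  unfold pvStepB
  split
  · rename_i hq
    have : st = [] := by
      by_contra h
      exact pv_popB_ne_nil p st h hq
    simp [this]
  · rename_i q t hq
    have hne : st ≠ [] := by
      rintro rfl; simp [pvPopB] at hq
    have hlast : (q :: t).getLast? = st.getLast? := by rw [← hq, pv_popB_getLast? p st hne]
    have hsome : ∃ x, st.getLast? = some x := by
      cases h : st.getLast?
      · cases st <;> simp_all
      · exact ⟨_, rfl⟩
    obtain ⟨x, hx⟩ := hsome
    split
    · rw [hlast, hx]; rfl
    · rw [List.getLast?_cons_cons, hlast, hx]; rfl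

lemma pv_stepB_mem {st : List (Int × Int)} {p x : Int × Int} (h : x ∈ pvStepB st p) :
    x ∈ st ∨ x = p := by
  unfold pvStepB at h
  split at h
  · simp at h; right; exact h
  · rename_i q t hq
    have hsub : ∀ y, y ∈ q :: t → y ∈ st := fun y hy => (hq ▸ pv_popB_suffix p st).mem hy
    split at h
    · exact Or.inl (hsub x h)
    · rcases List.mem_cons.mp h with rfl | h
      · exact Or.inr rfl
      · exact Or.inl (hsub x h)

lemma pv_stepB_chain {R : (Int × Int) → (Int × Int) → Prop} {st : List (Int × Int)} {p : Int × Int}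
    (hst : List.IsChain (fun a b => R b a) st)
    (hcr : ∀ x ∈ st, R x p ∨ x = p) :
    List.IsChain (fun a b => R b a) (pvStepB st p) := by
  unfold pvStepB
  split
  · simp
  · rename_i q t hq
    have hsub : (q :: t) <:+ st := hq ▸ pv_popB_suffix p st
    have hch : List.IsChain (fun a b => R b a) (q :: t) := hst.suffix hsub
    split
    · exact hch
    · rename_i hqp
      rw [List.isChain_cons_cons]
      refine ⟨?_, hch⟩
      rcases hcr q (hsub.mem (by simp)) with h | h
      · exact h
      · exact absurd h hqp

lemma pv_stepB_t3 {st : List (Int × Int)} {p : Int × Int} (ht : pvT3 st) :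
    pvT3 (pvStepB st p) := by
  unfold pvStepB
  split
  · intro i hi; simp at hi
  · rename_i q t hq
    have hsub : (q :: t) <:+ st := hq ▸ pv_popB_suffix p st
    have ht' : pvT3 (q :: t) := pv_t3_suffix hsub ht
    split
    · exact ht'
    · refine pv_t3_cons ht' ?_
      intro a t' hta
      have := pv_popB_stop p st q a t' (by rw [hq, hta])
      calc 0 < pvAreaB a q p := this
        _ = pvCrossA (pvSubA q a) (pvSubA p q) := by simp only [pvAreaB, pvCrossA, pvSubA]; ring

lemma pv_fold_inv (R : (Int × Int) → (Int × Int) → Prop) :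
    ∀ (pts st : List (Int × Int)),
    pts.Pairwise (fun a b => R a b ∨ a = b) →
    (∀ x ∈ st, ∀ p ∈ pts, R x p ∨ x = p) →
    List.IsChain (fun a b => R b a) st →
    pvT3 st →
    List.IsChain (fun a b => R b a) (pts.foldl pvStepB st) ∧
    pvT3 (pts.foldl pvStepB st) ∧
    (∀ x ∈ pts.foldl pvStepB st, x ∈ st ∨ x ∈ pts) ∧
    (pts.foldl pvStepB st).getLast? = st.getLast?.or pts.head? ∧
    (pts.foldl pvStepB st).head? = pts.getLast?.or st.head? := by
  intro pts
  induction pts with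
  | nil =>
    intro st _ _ hch ht3
    refine ⟨hch, ht3, fun x hx => Or.inl hx, by simp, by simp⟩
  | cons p rest ih =>
    intro st hpts hcross hch ht3
    have hst' := pv_stepB_chain hch (fun x hx => hcross x hx p (by simp))
    have ht3' := pv_stepB_t3 (p := p) ht3
    have hcross' : ∀ x ∈ pvStepB st p, ∀ q ∈ rest, R x q ∨ x = q := by
      intro x hx q hqr
      rcases pv_stepB_mem hx with hxs | rfl
      · exact hcross x hxs q (by simp [hqr])
      · exact List.rel_of_pairwise_cons hpts hqr
    obtain ⟨c1, c2, c3, c4, c5⟩ := ih (pvStepB st p) hpts.tail hcross' hst' ht3'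
    rw [List.foldl_cons]
    refine ⟨c1, c2, ?_, ?_, ?_⟩
    · intro x hx
      rcases c3 x hx with hx' | hx'
      · rcases pv_stepB_mem hx' with h | rfl
        · exact Or.inl h
        · exact Or.inr (by simp)
      · exact Or.inr (by simp [hx'])
    · rw [c4, pv_stepB_getLast? st p]
      cases st.getLast? <;> simp
    · rw [c5, pv_stepB_head? st p]
      cases hr : rest.getLast? with
      | none =>
        have : rest = [] := by cases rest <;> simp_all
        simp [this]
      | some x =>
        have : (p :: rest).getLast? = some x := by
          cases rest <;> simp_all [List.getLast?_cons_cons]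
        simp [this]

-- ---- chain-order turn predicates and the fan lemma ----
def pvTC (l : List (Int × Int)) : Prop :=
  ∀ i : Nat, (h : i + 2 < l.length) →
    0 < pvCrossA (pvSubA (l[i+1]'(by omega)) (l[i]'(by omega))) (pvSubA (l[i+2]'h) (l[i+1]'(by omega)))
def pvTN (l : List (Int × Int)) : Prop :=
  ∀ i : Nat, (h : i + 2 < l.length) →
    pvCrossA (pvSubA (l[i+1]'(by omega)) (l[i]'(by omega))) (pvSubA (l[i+2]'h) (l[i+1]'(by omega))) < 0

lemma pv_t3_reverse {l : List (Int × Int)} (h : pvT3 l) : pvTC l.reverse := by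
  intro i hi
  simp only [List.length_reverse] at hi
  have h1 : i < l.reverse.length := by simp; omega
  have h2 : i + 1 < l.reverse.length := by simp; omega
  have h3 : i + 2 < l.reverse.length := by simp; omega
  rw [List.getElem_reverse (by omega), List.getElem_reverse (by omega),
    List.getElem_reverse (by omega)]
  have hk : l.length - 1 - (i + 2) + 2 < l.length := by omega
  have := h (l.length - 1 - (i + 2)) hk
  have e1 : l.length - 1 - (i + 2) + 1 = l.length - 1 - (i + 1) := by omega
  have e2 : l.length - 1 - (i + 2) + 2 = l.length - 1 - i := by omega
  simp only [e1, e2] at this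
  exact this

lemma pv_t3_chainNeg {l : List (Int × Int)} (h : pvT3 l) : pvTN l := by
  intro i hi
  have := h i hi
  have flip : ∀ x y z : Int × Int,
      pvCrossA (pvSubA y z) (pvSubA x y) = - pvCrossA (pvSubA y x) (pvSubA z y) := by
    intro x y z; simp only [pvCrossA, pvSubA]; ring
  rw [flip] at this
  omega

lemma pv_cross_rebase (o a b : Int × Int) :
    pvCrossA (pvSubA a o) (pvSubA b o) = pvCrossA (pvSubA a o) (pvSubA b a) := by
  simp only [pvCrossA, pvSubA]; ring

lemma pv_cross_split (o a b : Int × Int) (w : Int × Int) :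
    pvCrossA (pvSubA b o) w = pvCrossA (pvSubA a o) w + pvCrossA (pvSubA b a) w := by
  simp only [pvCrossA, pvSubA]; ring

lemma pv_trans_neg {u v w : Int × Int} (hu : pvD u) (hv : pvD v) (hw : pvD w)
    (huv : pvCrossA u v < 0) (hvw : pvCrossA v w < 0) : pvCrossA u w < 0 := by
  have h1 : 0 < pvCrossA v u := by rw [pv_cross_antisymm v u]; omega
  have h2 : 0 < pvCrossA w v := by rw [pv_cross_antisymm w v]; omega
  have := pv_trans hw hv hu h2 h1
  rw [pv_cross_antisymm] at this; omega

lemma pv_fan_pos (o : Int × Int) (cs : List (Int × Int))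
    (hch : List.IsChain pvLexLt (o :: cs)) (htc : pvTC (o :: cs)) :
    ∀ i : Nat, (hi : i + 1 < cs.length) →
      0 < pvCrossA (pvSubA (cs[i]'(by omega)) o) (pvSubA (cs[i+1]'hi) o) := by
  have hpw : List.Pairwise pvLexLt (o :: cs) := pv_chain_pairwise (R := pvLexLt) (fun _ _ _ h1 h2 => pv_lexlt_trans h1 h2) hch
  have hD : ∀ k : Nat, (h : k < cs.length) → pvD (pvSubA (cs[k]'h) o) := by
    intro k h
    exact List.rel_of_pairwise_cons hpw (List.getElem_mem h)
  have hEdge : ∀ k : Nat, (h : k + 1 < cs.length) →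
      pvD (pvSubA (cs[k+1]'h) (cs[k]'(by omega))) := by
    intro k h
    have hch2 : List.IsChain pvLexLt cs := hch.tail
    have := List.isChain_iff_getElem.mp hch2 k (by omega)
    exact this
  intro i
  induction i with
  | zero =>
    intro hi
    rw [pv_cross_rebase]
    have := htc 0 (by simp; omega)
    simpa using this
  | succ i' ih =>
    intro hi
    have hI := ih (by omega)
    rw [pv_cross_rebase] at hI ⊢
    have hEE : 0 < pvCrossA (pvSubA (cs[i'+1]'(by omega)) (cs[i']'(by omega)))
        (pvSubA (cs[i'+2]'(by omega)) (cs[i'+1]'(by omega))) := by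
      have := htc (i' + 1) (by simp; omega)
      simpa using this
    have hDE : 0 < pvCrossA (pvSubA (cs[i']'(by omega)) o)
        (pvSubA (cs[i'+2]'(by omega)) (cs[i'+1]'(by omega))) :=
      pv_trans (hD i' (by omega)) (hEdge i' (by omega)) (hEdge (i'+1) (by omega)) hI hEE
    rw [pv_cross_split (a := cs[i']'(by omega)) (o := o)]
    linarith [hDE, hEE]

lemma pv_fan_neg (o : Int × Int) (cs : List (Int × Int))
    (hch : List.IsChain pvLexLt (o :: cs)) (htn : pvTN (o :: cs)) :
    ∀ i : Nat, (hi : i + 1 < cs.length) →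
      pvCrossA (pvSubA (cs[i]'(by omega)) o) (pvSubA (cs[i+1]'hi) o) < 0 := by
  have hpw : List.Pairwise pvLexLt (o :: cs) := pv_chain_pairwise (R := pvLexLt) (fun _ _ _ h1 h2 => pv_lexlt_trans h1 h2) hch
  have hD : ∀ k : Nat, (h : k < cs.length) → pvD (pvSubA (cs[k]'h) o) := by
    intro k h
    exact List.rel_of_pairwise_cons hpw (List.getElem_mem h)
  have hEdge : ∀ k : Nat, (h : k + 1 < cs.length) →
      pvD (pvSubA (cs[k+1]'h) (cs[k]'(by omega))) := by
    intro k h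
    have hch2 : List.IsChain pvLexLt cs := hch.tail
    have := List.isChain_iff_getElem.mp hch2 k (by omega)
    exact this
  intro i
  induction i with
  | zero =>
    intro hi
    rw [pv_cross_rebase]
    have := htn 0 (by simp; omega)
    simpa using this
  | succ i' ih =>
    intro hi
    have hI := ih (by omega)
    rw [pv_cross_rebase] at hI ⊢
    have hEE : pvCrossA (pvSubA (cs[i'+1]'(by omega)) (cs[i']'(by omega)))
        (pvSubA (cs[i'+2]'(by omega)) (cs[i'+1]'(by omega))) < 0 := by
      have := htn (i' + 1) (by simp; omega)
      simpa using this
    have hDE : pvCrossA (pvSubA (cs[i']'(by omega)) o)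
        (pvSubA (cs[i'+2]'(by omega)) (cs[i'+1]'(by omega))) < 0 :=
      pv_trans_neg (hD i' (by omega)) (hEdge i' (by omega)) (hEdge (i'+1) (by omega)) hI hEE
    rw [pv_cross_split (a := cs[i']'(by omega)) (o := o)]
    linarith [hDE, hEE]

-- ---- pairwise winding from chain winding inside pvD ----
lemma pv_chainD_pairwise : ∀ {vs : List (Int × Int)}, (∀ v ∈ vs, pvD v) →
    List.IsChain (fun u v => 0 < pvCrossA u v) vs →
    vs.Pairwise (fun u v => 0 < pvCrossA u v) := by
  intro vs
  induction vs with
  | nil => intro _ _; exact List.Pairwise.nil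
  | cons x t ih =>
    intro hd h
    rcases t with _ | ⟨y, t'⟩
    · simp
    · have hxy : 0 < pvCrossA x y := h.rel_head
      have hpt := ih (fun v hv => hd v (by simp [hv])) h.tail
      refine List.Pairwise.cons ?_ hpt
      intro z hz
      rcases List.mem_cons.mp hz with rfl | hz
      · exact hxy
      · exact pv_trans (hd x (by simp)) (hd y (by simp)) (hd z (by simp [hz])) hxy
          (List.rel_of_pairwise_cons hpt hz)

-- ---- the hull produced by the fold has the star property around its first vertex ----
lemma pv_star_aux (pts SL SU : List (Int × Int))
    (hp : pts.Pairwise (fun a b => pvLexLt a b ∨ a = b))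
    (hSLeq : pts.foldl pvStepB [] = SL) (hSUeq : pts.reverse.foldl pvStepB [] = SU) :
    pvStar (SL.reverse ++ (SU.dropLast).tail.reverse) := by
  obtain ⟨CL, TL, memL, lastL, headL⟩ :=
    pv_fold_inv pvLexLt pts [] hp (by simp) (by simp) (by intro i h; simp at h)
  have hp' : pts.reverse.Pairwise (fun a b => (fun a b => pvLexLt b a) a b ∨ a = b) := by
    rw [List.pairwise_reverse]
    exact hp.imp (fun h => h.imp id Eq.symm)
  obtain ⟨CU, TU, memU, lastU, headU⟩ :=
    pv_fold_inv (fun a b => pvLexLt b a) pts.reverse [] hp' (by simp) (by simp)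
      (by intro i h; simp at h)
  rw [hSLeq] at CL TL memL lastL headL
  rw [hSUeq] at CU TU memU lastU headU
  simp only [List.getLast?_nil, List.head?_nil, Option.none_or, Option.or_none]
    at lastL headL lastU headU
  by_cases hpe : pts = []
  · subst hpe
    simp at hSLeq hSUeq
    intro i j h1 hij hj
    rw [hSLeq, hSUeq] at hj
    simp at hj
  · obtain ⟨p0, hp0⟩ : ∃ a, pts.head? = some a := by
      cases pts with
      | nil => exact absurd rfl hpe
      | cons a t => exact ⟨a, rfl⟩
    obtain ⟨pmax, hpm⟩ : ∃ a, pts.getLast? = some a := by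
      cases hg : pts.getLast? with
      | none => exact absurd (List.getLast?_eq_none_iff.mp hg) hpe
      | some a => exact ⟨a, rfl⟩
    have lcHead : SL.reverse.head? = some p0 := by
      rw [List.head?_reverse, lastL, hp0]
    have lcLast : SL.reverse.getLast? = some pmax := by
      rw [List.getLast?_reverse, headL, hpm]
    have MHead : SU.head? = some p0 := by
      rw [headU, List.getLast?_reverse, hp0]
    have MLast : SU.getLast? = some pmax := by
      rw [lastU, List.head?_reverse, hpm]
    obtain ⟨lcT, hlc⟩ : ∃ t, SL.reverse = p0 :: t := by
      cases h : SL.reverse with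
      | nil => rw [h] at lcHead; simp at lcHead
      | cons a t =>
        rw [h] at lcHead; simp at lcHead
        exact ⟨t, by rw [lcHead]⟩
    obtain ⟨Mt, hM⟩ : ∃ t, SU = p0 :: t := by
      cases h : SU with
      | nil => rw [h] at MHead; simp at MHead
      | cons a t =>
        rw [h] at MHead; simp at MHead
        exact ⟨t, by rw [MHead]⟩
    have chainLC : List.IsChain pvLexLt (p0 :: lcT) := by
      rw [← hlc]; exact List.isChain_reverse.mpr CL
    have tcLC : pvTC (p0 :: lcT) := hlc ▸ pv_t3_reverse TL
    have fanL := pv_fan_pos p0 lcT chainLC tcLC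
    have pwLC := pv_chain_pairwise (R := pvLexLt) (fun _ _ _ h1 h2 => pv_lexlt_trans h1 h2) chainLC
    have DL : ∀ x ∈ lcT, pvD (pvSubA x p0) := fun x hx => List.rel_of_pairwise_cons pwLC hx
    have chainM : List.IsChain pvLexLt (p0 :: Mt) := by
      rw [← hM]; exact CU
    have tnM : pvTN (p0 :: Mt) := hM ▸ pv_t3_chainNeg TU
    have fanU := pv_fan_neg p0 Mt chainM tnM
    have pwM := pv_chain_pairwise (R := pvLexLt) (fun _ _ _ h1 h2 => pv_lexlt_trans h1 h2) chainM
    have DM : ∀ x ∈ Mt, pvD (pvSubA x p0) := fun x hx => List.rel_of_pairwise_cons pwM hx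
    have hMtail : Mt.getLast? = some pmax ∨ Mt = [] := by
      cases Mt with
      | nil => exact Or.inr rfl
      | cons a t =>
        left
        rw [hM, List.getLast?_cons_cons] at MLast
        exact MLast
    have hM' : (SU.dropLast).tail = Mt.dropLast := by
      rw [hM]
      cases Mt with
      | nil => simp
      | cons m1 Mt' => rw [List.dropLast_cons₂]; rfl
    have hform : SL.reverse ++ (SU.dropLast).tail.reverse
        = p0 :: (lcT ++ Mt.dropLast.reverse) := by
      rw [hlc, hM']; rfl
    have chain1 : List.IsChain (fun u v => 0 < pvCrossA u v)
        (lcT.map (fun x => pvSubA x p0)) := by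
      rw [List.isChain_iff_getElem]
      intro k hk
      simp only [List.length_map] at hk
      simp only [List.getElem_map]
      exact fanL k hk
    have chainMt : List.IsChain (fun u v => 0 < pvCrossA v u)
        (Mt.map (fun x => pvSubA x p0)) := by
      rw [List.isChain_iff_getElem]
      intro k hk
      simp only [List.length_map] at hk
      simp only [List.getElem_map]
      have := fanU k hk
      rw [pv_cross_antisymm] at this
      omega
    have chain2 : List.IsChain (fun u v => 0 < pvCrossA u v)
        ((Mt.dropLast.reverse).map (fun x => pvSubA x p0)) := by
      rw [List.map_reverse, List.isChain_reverse]
      have heq : (Mt.dropLast).map (fun x => pvSubA x p0)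
          = ((Mt.map (fun x => pvSubA x p0)).dropLast) := by
        rw [List.map_dropLast]
      rw [heq]
      exact chainMt.prefix (List.dropLast_prefix _)
    have link : ∀ x ∈ (lcT.map (fun x => pvSubA x p0)).getLast?,
        ∀ y ∈ ((Mt.dropLast.reverse).map (fun x => pvSubA x p0)).head?, 0 < pvCrossA x y := by
      intro x hx y hy
      rw [Option.mem_def, List.getLast?_map, Option.map_eq_some_iff] at hx
      obtain ⟨a, ha, rfl⟩ := hx
      rw [Option.mem_def, List.head?_map, List.head?_reverse, Option.map_eq_some_iff] at hy
      obtain ⟨b, hb, rfl⟩ := hy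
      -- a = pmax
      have hlcT_ne : lcT ≠ [] := by
        intro h; rw [h] at ha; simp at ha
      have ha' : a = pmax := by
        rw [hlc] at lcLast
        have : (p0 :: lcT).getLast? = lcT.getLast? := by
          cases lcT with
          | nil => exact absurd rfl hlcT_ne
          | cons c t => rw [List.getLast?_cons_cons]
        rw [this, ha] at lcLast
        exact Option.some_injective _ lcLast
      -- b = Mt[Mt.length - 2], pmax = Mt[Mt.length - 1]
      have hdl_ne : Mt.dropLast ≠ [] := by
        intro h; rw [h] at hb; simp at hb
      have hlen2 : 2 ≤ Mt.length := by
        rcases Mt with _ | ⟨a1, t1⟩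
        · simp at hdl_ne
        · rcases t1 with _ | ⟨a2, t2⟩
          · simp at hdl_ne
          · simp
      have hblt : Mt.length - 2 < Mt.dropLast.length := by
        rw [List.length_dropLast]; omega
      have hb' : b = Mt[Mt.length - 2]'(by omega) := by
        rw [List.getLast?_eq_getElem?, List.getElem?_eq_some_iff] at hb
        obtain ⟨hlt, hbv⟩ := hb
        have hidx : Mt.dropLast.length - 1 = Mt.length - 2 := by
          rw [List.length_dropLast]
          omega
        rw [← hbv, List.getElem_dropLast]
        simp only [hidx]
      have hpm' : a = Mt[Mt.length - 1]'(by omega) := by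
        rcases hMtail with h | h
        · rw [List.getLast?_eq_getElem?, List.getElem?_eq_some_iff] at h
          obtain ⟨hlt, hbv⟩ := h
          exact ha'.trans hbv.symm
        · rw [h] at hlen2; simp at hlen2
      have hk : Mt.length - 2 + 1 < Mt.length := by omega
      have hfan := fanU (Mt.length - 2) hk
      rw [pv_cross_antisymm] at hfan
      have he : Mt.length - 2 + 1 = Mt.length - 1 := by omega
      rw [hb', hpm']
      simp only [he] at hfan
      omega
    have chainAll : List.IsChain (fun u v => 0 < pvCrossA u v)
        ((lcT ++ Mt.dropLast.reverse).map (fun x => pvSubA x p0)) := by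
      rw [List.map_append]
      exact List.isChain_append.mpr ⟨chain1, chain2, link⟩
    have dAll : ∀ v ∈ (lcT ++ Mt.dropLast.reverse).map (fun x => pvSubA x p0), pvD v := by
      intro v hv
      rw [List.mem_map] at hv
      obtain ⟨x, hx, rfl⟩ := hv
      rcases List.mem_append.mp hx with h | h
      · exact DL x h
      · exact DM x (List.Sublist.mem (List.mem_reverse.mp h) (List.dropLast_sublist _))
    have pwAll := pv_chainD_pairwise dAll chainAll
    rw [hform]
    intro i j h1 hij hj
    simp only [List.length_cons] at hj
    obtain ⟨i', rfl⟩ : ∃ i', i = i' + 1 := ⟨i - 1, by omega⟩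
    obtain ⟨j', rfl⟩ : ∃ j', j = j' + 1 := ⟨j - 1, by omega⟩
    simp only [List.getElem_cons_succ, List.getElem_cons_zero]
    have := (List.pairwise_iff_getElem.mp pwAll) i' j'
      (by simp only [List.length_map]; omega) (by simp only [List.length_map]; omega) (by omega)
    simp only [List.getElem_map] at this
    exact this

lemma pv_hullB_star (points : List (Int × Int)) : pvStar (pvHullB points) := by
  have hhull : pvHullB points
      = (PySem.List.sorted2 points Prod.fst Prod.snd |>.foldl pvStepB []).reverse ++
        ((((PySem.List.sorted2 points Prod.fst Prod.snd).reverse.foldl pvStepB []).dropLast).tail).reverse := by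
    show (_ : List (Int × Int)).reverse ++ ((_ : List (Int × Int)).reverse.drop 1).dropLast = _
    rw [List.drop_one, List.tail_reverse, List.dropLast_reverse]
  rw [hhull]
  exact pv_star_aux _ _ _ (pv_sorted2_pairwise points) rfl rfl

-- ---- port A's hull construction computes the same list as port B's ----
lemma pv_turn_cond (a b r : Int × Int) : (pvTurnA a b r ≠ 1) ↔ pvAreaB a b r ≤ 0 := by
  have he : (b.1 - a.1) * (r.2 - a.2) - (r.1 - a.1) * (b.2 - a.2) = pvAreaB a b r := by
    simp only [pvAreaB]; ring
  unfold pvTurnA pvCmpA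
  rw [he]
  split_ifs with h1 h2 <;> omega

lemma pv_getA_rev_neg1 (st : List (Int × Int)) (x : Int × Int) (h : st.head? = some x) :
    pvGetA st.reverse (-1) = x := by
  unfold pvGetA
  rw [PySem.List.pyGet?_neg_one, List.getLast?_reverse, h]
  rfl

lemma pv_getA_rev_neg2 (b a : Int × Int) (t : List (Int × Int)) :
    pvGetA (b :: a :: t).reverse (-2) = a := by
  unfold pvGetA
  rw [PySem.List.pyGet?_neg_ofNat _ 2 (by omega) (by simp)]
  have hlen : (b :: a :: t).reverse.length - 2 = t.length := by simp
  rw [hlen]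
  have : (b :: a :: t).reverse = (a :: t).reverse ++ [b] := by simp
  rw [this, List.getElem?_append_left (by simp)]
  rw [List.getElem?_reverse (by simp)]
  simp

lemma pv_pop_bridge (r : Int × Int) : ∀ st : List (Int × Int),
    pvPopA st.reverse r = (pvPopB st r).reverse := by
  intro st
  induction st with
  | nil => rw [pvPopA]; simp [pvPopB]
  | cons b t ih =>
    match t with
    | [] =>
      rw [pvPopA]
      simp [pvPopB]
    | a :: t' =>
      rw [pvPopA]
      rw [pv_getA_rev_neg1 _ b rfl, pv_getA_rev_neg2 b a t']
      by_cases hc : pvAreaB a b r ≤ 0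
      · have hcond : 1 < (b :: a :: t').reverse.length ∧ pvTurnA a b r ≠ 1 :=
          ⟨by simp, (pv_turn_cond a b r).mpr hc⟩
        rw [dif_pos hcond]
        have hdrop : (b :: a :: t').reverse.dropLast = (a :: t').reverse := by
          rw [List.dropLast_reverse]; rfl
        rw [hdrop, ih]
        rw [show pvPopB (b :: a :: t') r = pvPopB (a :: t') r by
          rw [pvPopB]; simp [hc]]
      · have hcond : ¬ (1 < (b :: a :: t').reverse.length ∧ pvTurnA a b r ≠ 1) := by
          rintro ⟨_, hne⟩
          exact hc ((pv_turn_cond a b r).mp hne)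
        rw [dif_neg hcond]
        rw [show pvPopB (b :: a :: t') r = b :: a :: t' by
          rw [pvPopB]; simp [hc]]

lemma pv_left_bridge (r : Int × Int) (st : List (Int × Int)) :
    pvLeftA st.reverse r = (pvStepB st r).reverse := by
  unfold pvLeftA pvStepB
  rw [pv_pop_bridge r st]
  cases hst : pvPopB st r with
  | nil => simp
  | cons q t =>
    by_cases hqr : q = r
    · rw [if_neg (by rw [pv_getA_rev_neg1 (q :: t) q rfl]; simp [hqr])]
      simp [hqr]
    · rw [if_pos (Or.inr (by rw [pv_getA_rev_neg1 (q :: t) q rfl]; exact hqr))]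
      simp [hqr]

lemma pv_reduce_bridge (pts : List (Int × Int)) : ∀ st : List (Int × Int),
    pts.foldl pvLeftA st.reverse = (pts.foldl pvStepB st).reverse := by
  induction pts with
  | nil => intro st; rfl
  | cons p rest ih =>
    intro st
    rw [List.foldl_cons, List.foldl_cons, pv_left_bridge p st, ih (pvStepB st p)]

lemma pv_hullA_eq_hullB (points : List (Int × Int)) : pvConvexHullA points = pvHullB points := by
  simp only [pvConvexHullA, pvHullB, pvHalfHullB]
  have h1 : ∀ q : List (Int × Int), q.foldl pvLeftA [] = (q.foldl pvStepB []).reverse := by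
    intro q
    have := pv_reduce_bridge q []
    simpa using this
  rw [h1, h1]
  congr 1
  have hmid : ∀ u : List (Int × Int),
      List.take (u.length - 2) (List.drop 1 u) = (u.drop 1).dropLast := by
    intro u
    rw [List.dropLast_eq_take, List.length_drop]
    congr 1
  exact hmid _

-- ---- the per-point test: binary fan search (A) = linear fan scan (B) ----
lemma pv_getB_eq : pvGetB = pvGetA := rfl

lemma pv_getA_elem (hl : List (Int × Int)) (i : Int) (h0 : 0 ≤ i) (h1 : i < (hl.length : Int)) :
    pvGetA hl i = hl[i.toNat]'(by omega) := by
  unfold pvGetA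
  rw [PySem.List.pyGet?_of_nonneg hl h0, List.getElem?_eq_getElem (by omega)]
  rfl

-- Q i := the point s is (weakly) left of the fan ray towards vertex i
lemma pv_mono_step (hl : List (Int × Int)) (s : Int × Int) (hstar : pvStar hl)
    (hg1 : pvSapA (pvGetA hl 0) s (pvGetA hl 1) ≤ 0) :
    ∀ i : Int, 2 ≤ i → i + 1 ≤ (hl.length : Int) - 1 →
    0 ≤ pvSapA (pvGetA hl 0) s (pvGetA hl i) →
    0 ≤ pvSapA (pvGetA hl 0) s (pvGetA hl (i + 1)) := by
  intro i h2 hub hQ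
  have hN : (3 : Int) ≤ hl.length := by omega
  have e0 : pvGetA hl 0 = hl[0]'(by omega) := pv_getA_elem hl 0 (by omega) (by omega)
  have e1 : pvGetA hl 1 = hl[1]'(by omega) := pv_getA_elem hl 1 (by omega) (by omega)
  have ei : pvGetA hl i = hl[i.toNat]'(by omega) := pv_getA_elem hl i (by omega) (by omega)
  have ei1 : pvGetA hl (i + 1) = hl[i.toNat + 1]'(by omega) := by
    rw [pv_getA_elem hl (i+1) (by omega) (by omega)]
    congr 1
    omega
  rw [e0, e1] at hg1
  rw [e0, ei] at hQ
  rw [e0, ei1]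
  rw [pv_sap_cross] at hg1 hQ ⊢
  exact pv_mono hg1 (hstar 1 i.toNat (by omega) (by omega) (by omega))
    (hstar 1 (i.toNat + 1) (by omega) (by omega) (by omega))
    (hstar i.toNat (i.toNat + 1) (by omega) (by omega) (by omega)) hQ

lemma pv_up_closed (hl : List (Int × Int)) (s : Int × Int) (hstar : pvStar hl)
    (hg1 : pvSapA (pvGetA hl 0) s (pvGetA hl 1) ≤ 0) (t : Int) (h2 : 2 ≤ t)
    (hQ : 0 ≤ pvSapA (pvGetA hl 0) s (pvGetA hl t)) :
    ∀ j : Int, t ≤ j → j ≤ (hl.length : Int) - 1 →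
      0 ≤ pvSapA (pvGetA hl 0) s (pvGetA hl j) := by
  intro j hj
  induction j, hj using Int.le_induction with
  | base => intro _; exact hQ
  | succ n hn ihn =>
    intro hub
    exact pv_mono_step hl s hstar hg1 n (by omega) (by omega) (ihn (by omega))

lemma pv_scan_spec (hl : List (Int × Int)) (s : Int × Int) (N : Int)
    (hN : N = (hl.length : Int))
    (hQN : 0 ≤ pvSapA (pvGetA hl 0) s (pvGetA hl (N - 1)))
    (h3 : 3 ≤ N) :
    ∀ (k : Nat) (i : Int), (N - 1 - i).toNat = k → 2 ≤ i → i ≤ N - 1 →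
    (∀ j, 2 ≤ j → j < i → ¬ 0 ≤ pvSapA (pvGetA hl 0) s (pvGetA hl j)) →
    (2 ≤ pvScanB hl s N i ∧ pvScanB hl s N i ≤ N - 1 ∧
     0 ≤ pvSapA (pvGetA hl 0) s (pvGetA hl (pvScanB hl s N i)) ∧
     (∀ j, 2 ≤ j → j < pvScanB hl s N i →
        ¬ 0 ≤ pvSapA (pvGetA hl 0) s (pvGetA hl j))) := by
  intro k
  induction k using Nat.strong_induction_on with
  | _ k ihk =>
    intro i hk h2 hle hno
    rw [pvScanB]
    by_cases hlt : i < N - 1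
    · rw [dif_pos hlt]
      by_cases hQ : pvAreaB (pvGetB hl 0) s (pvGetB hl i) ≥ 0
      · rw [if_pos hQ]
        rw [pv_getB_eq, ← pv_sap_area] at hQ
        exact ⟨h2, by omega, hQ, hno⟩
      · rw [if_neg hQ]
        rw [pv_getB_eq, ← pv_sap_area] at hQ
        refine ihk (N - 1 - (i+1)).toNat (by omega) (i + 1) rfl (by omega) (by omega) ?_
        intro j hj2 hji
        by_cases hji' : j < i
        · exact hno j hj2 hji'
        · have : j = i := by omega
          rw [this]
          exact hQ
    · rw [dif_neg hlt]
      have : i = N - 1 := by omega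
      refine ⟨by omega, by omega, hQN, ?_⟩
      intro j hj2 hjt
      exact hno j hj2 (by omega)

lemma pv_bsearch_spec (hl : List (Int × Int)) (s : Int × Int) (N t : Int)
    (hQ : 0 ≤ pvSapA (pvGetA hl 0) s (pvGetA hl t))
    (hmin : ∀ j, 2 ≤ j → j < t → ¬ 0 ≤ pvSapA (pvGetA hl 0) s (pvGetA hl j))
    (hup : ∀ j, t ≤ j → j ≤ N - 1 → 0 ≤ pvSapA (pvGetA hl 0) s (pvGetA hl j)) :
    ∀ (k : Nat) (l r line : Int), (r + 1 - l).toNat = k → 2 ≤ l → l ≤ t → r ≤ N - 1 →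
    ((line = -1 ∧ t ≤ r) ∨ (line = r + 1 ∧ t ≤ line)) →
    pvBsearchA hl s l r line = t := by
  intro k
  induction k using Nat.strong_induction_on with
  | _ k ihk =>
    intro l r line hk h2 hlt hrN hbr
    rw [pvBsearchA]
    by_cases hlr : l ≤ r
    · rw [dif_pos hlr]
      have hmid := PySem.Int.floordiv_two_mid_bounds hlr
      set mid := PySem.Int.floordiv (l + r) 2 with hmid_def
      by_cases hQm : pvSapA (pvGetA hl 0) s (pvGetA hl mid) ≥ 0
      · rw [if_pos hQm]
        have htm : t ≤ mid := by
          by_contra hcon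
          exact hmin mid (by omega) (by omega) hQm
        refine ihk (mid - 1 + 1 - l).toNat (by omega) l (mid - 1) mid rfl h2 hlt (by omega) ?_
        right
        exact ⟨by omega, htm⟩
      · rw [if_neg hQm]
        have hmt : mid < t := by
          by_contra hcon
          exact hQm (hup mid (by omega) (by omega))
        refine ihk (r + 1 - (mid + 1)).toNat (by omega) (mid + 1) r line rfl (by omega)
          (by omega) hrN hbr
    · rw [dif_neg hlr]
      rcases hbr with ⟨hl1, hl2⟩ | ⟨hl1, hl2⟩
      · omega
      · omega

lemma pv_inside_eq (hl : List (Int × Int)) (s : Int × Int) (hstar : pvStar hl) :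
    pvIsInsideA hl 0 (PySem.List.len hl - 1) s = pvInsideB hl s := by
  unfold pvIsInsideA pvInsideB
  simp only [PySem.List.len_eq, pv_getB_eq, ← pv_sap_area]
  have harg : (hl.length : Int) - 1 - 0 + 1 = (hl.length : Int) := by ring
  simp only [harg]
  by_cases h3 : (hl.length : Int) < 3
  · rw [if_pos h3, if_pos h3]
  · rw [if_neg h3, if_neg h3]
    by_cases hg1 : pvSapA (pvGetA hl 0) s (pvGetA hl 1) > 0
    · rw [if_pos hg1, if_pos hg1]
    · rw [if_neg hg1, if_neg hg1]
      by_cases hg2 : pvSapA (pvGetA hl 0) s (pvGetA hl ((hl.length : Int) - 1)) < 0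
      · rw [if_pos hg2, if_pos hg2]
      · rw [if_neg hg2, if_neg hg2]
        obtain ⟨ht2, htle, htQ, htmin⟩ :=
          pv_scan_spec hl s (hl.length : Int) rfl (by omega) (by omega)
            ((hl.length : Int) - 1 - 2).toNat 2 rfl (by omega) (by omega)
            (by intro j hj2 hji; omega)
        have hup := pv_up_closed hl s hstar (by omega) (pvScanB hl s (hl.length : Int) 2)
          ht2 htQ
        have hbs := pv_bsearch_spec hl s (hl.length : Int) (pvScanB hl s (hl.length : Int) 2)
          htQ htmin hup ((hl.length : Int) - 1 + 1 - 2).toNat 2 ((hl.length : Int) - 1) (-1)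
          rfl (by omega) ht2 (by omega) (Or.inl ⟨rfl, htle⟩)
        rw [hbs]

-- ===== VERDICT (by name: the statement is the Claim_ definition above) =====
theorem saint_john_spec : Claim_equal_saint_john := by
  intro large L small S _
  unfold Spec_saint_john saint_john saint_john_alt
  rw [pv_hullA_eq_hullB]
  have hin : ∀ s, pvIsInsideA (pvHullB large) 0 (PySem.List.len (pvHullB large) - 1) s
      = pvInsideB (pvHullB large) s :=
    fun s => pv_inside_eq _ s (pv_hullB_star large)
  simp only [hin]
  rw [PySem.List.foldl_if_add_one]
  simp
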